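-- pv_equiv track=rewrite | github.com/Nguyenvangiahuy123/lc79-betvip-api | main.py | elliott_wave_break
-- ===== SOURCE A (Python) =====
-- def elliott_wave_break(history):
--     if len(history) < 13: return False
--     # Mô phỏng sóng Elliott 5-3
--     nums = [1 if c=='T' else 0 for c in history[-13:]]
--     # Kiểm tra xem có 5 sóng tăng giảm không
--     diff = [nums[i+1] - nums[i] for i in range(len(nums)-1)]
--     # Đếm số lần đổi dấu
--     sign_changes = sum(1 for i in range(1, len(diff)) if diff[i] * diff[i-1] < 0)
--     if sign_changes >= 3:
--         return True
--     return False
-- ===== SOURCE B (Python) =====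
-- def elliott_wave_break(history):
--     if len(history) < 13:
--         return False
--     # Run-length encode the boolean window: maximal blocks of equal values.
--     runs = []
--     for c in history[-13:]:
--         t = (c == 'T')
--         if runs and runs[-1][0] == t:
--             runs[-1][1] += 1
--         else:
--             runs.append([t, 1])
--     # A diff sign change happens exactly at each interior run of length 1.
--     singles = sum(1 for r in runs[1:-1] if r[1] == 1)
--     return singles >= 3
-- ===== Notes on version B (the rewrite author's own statement) =====
-- stated objective: alternative
-- what changed: B run-length encodes the boolean last-13 window into maximal runs and returns whether at least three interior runs have length 1, instead of A's diff list plus sign-change product scan.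
import Mathlib
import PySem

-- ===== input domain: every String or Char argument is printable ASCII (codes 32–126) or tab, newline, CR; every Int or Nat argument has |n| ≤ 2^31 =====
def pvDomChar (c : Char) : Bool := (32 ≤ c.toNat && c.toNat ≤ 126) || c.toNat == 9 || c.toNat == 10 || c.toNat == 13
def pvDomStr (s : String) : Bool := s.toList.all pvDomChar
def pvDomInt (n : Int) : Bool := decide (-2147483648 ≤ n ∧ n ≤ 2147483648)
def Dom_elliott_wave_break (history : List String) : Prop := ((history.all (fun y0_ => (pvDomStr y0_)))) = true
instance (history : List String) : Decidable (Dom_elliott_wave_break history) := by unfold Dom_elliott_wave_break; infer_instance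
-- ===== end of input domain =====

-- B replaces A's diff-list + sign-change product scan by run-length encoding the window
-- and counting interior runs of length 1 (a sign change occurs exactly where an interior
-- run of length 1 closes); objective: alternative, same cost.


-- ===== PORT A =====
def elliott_wave_break (history : List String) : Bool :=
  if history.length < 13 then false
  else
    let nums : List Int := (PySem.List.slice history (some (-13)) none).map
      (fun c => if c == "T" then 1 else 0)
    let diff : List Int := (PySem.List.pyRange 0 ((nums.length : Int) - 1)).map
      (fun i => PySem.List.pyGetD nums (i + 1) 0 - PySem.List.pyGetD nums i 0)
    let sign_changes : Int :=
      ((PySem.List.pyRange 1 ((diff.length : Int))).map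
        (fun i => if PySem.List.pyGetD diff i 0 * PySem.List.pyGetD diff (i - 1) 0 < 0
                  then (1 : Int) else 0)).sum
    if sign_changes ≥ 3 then true else false

-- ===== PORT B =====
-- run-length encoding: Python appends [t,1] or mutates runs[-1][1] += 1; the mutation is
-- ported as replacing the last pair (exact, step for step).
def elliott_wave_break_alt (history : List String) : Bool :=
  if history.length < 13 then false
  else
    let runs : List (Bool × Int) := (PySem.List.slice history (some (-13)) none).foldl
      (fun runs c =>
        match runs.getLast? with
        | some (b, n) => if b == (c == "T") then runs.dropLast ++ [(b, n + 1)]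
                         else runs ++ [((c == "T"), 1)]
        | none => [((c == "T"), 1)])
      []
    let singles : Int := (PySem.List.slice runs (some 1) (some (-1))).foldl
      (fun acc r => if r.2 == 1 then acc + 1 else acc) 0
    decide (singles ≥ 3)

-- ===== PRECONDITION & SPEC =====
def Spec_elliott_wave_break (history : List String) (out : Bool) : Prop := out = elliott_wave_break_alt history
instance (history : List String) (out : Bool) : Decidable (Spec_elliott_wave_break history out) := by unfold Spec_elliott_wave_break; infer_instance

-- ===== CLAIM (what is proved, stated in full; the proofs are below) =====
def Claim_equal_elliott_wave_break : Prop := ∀ (history : List String), Dom_elliott_wave_break history → Spec_elliott_wave_break history (elliott_wave_break history)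

-- ===== LEMMAS AND PROOFS =====

-- B's fold body, named for the proofs.
def pvStep (runs : List (Bool × Int)) (t : Bool) : List (Bool × Int) :=
  match runs.getLast? with
  | some (b, n) => if b == t then runs.dropLast ++ [(b, n + 1)] else runs ++ [(t, 1)]
  | none => [(t, 1)]

-- Front-recursive run-length encoder with an open run (a, n).
def pvRLE : Bool → Int → List Bool → List (Bool × Int)
  | a, n, [] => [(a, n)]
  | a, n, t :: l => if a == t then pvRLE a (n + 1) l else (a, n) :: pvRLE t 1 l

-- Count of interior strict local extrema, p = element preceding the list.
def pvE : Bool → List Bool → Nat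
  | p, b :: c :: t => (if (b != p) && (b != c) then 1 else 0) + pvE b (c :: t)
  | _, _ => 0

def pvE' (a : Bool) (l : List Bool) : Nat :=
  match l with
  | [] => 0
  | _ :: _ => (if a != l.headI then 1 else 0) + pvE a l

-- Singles counter with state: current run value a, flag s = "current run has length 1".
def pvG : Bool → Bool → List Bool → Nat
  | _, _, [] => 0
  | a, s, t :: l => if a == t then pvG a false l else (if s then 1 else 0) + pvG t true l

theorem pvRLE_ne_nil (a : Bool) (n : Int) (l : List Bool) : pvRLE a n l ≠ [] := by
  induction l generalizing a n with
  | nil => simp [pvRLE]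
  | cons t l ih =>
    simp only [pvRLE]
    split
    · exact ih _ _
    · simp

theorem pv_foldl_rle (l : List Bool) (pre : List (Bool × Int)) (a : Bool) (n : Int) :
    l.foldl pvStep (pre ++ [(a, n)]) = pre ++ pvRLE a n l := by
  induction l generalizing pre a n with
  | nil => simp [pvRLE]
  | cons t l ih =>
    simp only [List.foldl_cons]
    have hstep : pvStep (pre ++ [(a, n)]) t =
        if a == t then pre ++ [(a, n + 1)] else (pre ++ [(a, n)]) ++ [(t, 1)] := by
      simp [pvStep]
    rw [hstep]
    by_cases hat : (a == t) = true
    · rw [if_pos hat, ih]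
      simp [pvRLE, hat]
    · rw [if_neg hat, ih (pre ++ [(a, n)]) t 1]
      simp [pvRLE, hat]
theorem pv_foldl_rle_nil (x : Bool) (l : List Bool) :
    (x :: l).foldl pvStep [] = pvRLE x 1 l := by
  have h0 : pvStep [] x = [(x, 1)] := by simp [pvStep]
  simpa [h0] using pv_foldl_rle l [] x 1

theorem pv_slice_one_neg_one {α : Type} (l : List α) :
    PySem.List.slice l (some 1) (some (-1)) = l.tail.dropLast := by
  cases l with
  | nil => simp [PySem.List.slice, PySem.List.clampIdx]
  | cons x t =>
    simp [PySem.List.slice, PySem.List.clampIdx, List.dropLast_eq_take]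
    split_ifs <;> omega

theorem pvE_cons_self (a : Bool) (l : List Bool) : pvE a (a :: l) = pvE a l := by
  cases l with
  | nil => simp [pvE]
  | cons c r => simp [pvE]

theorem pvE_cons_ne (a t : Bool) (r : List Bool) (h : (a == t) = false) :
    pvE a (t :: r) = pvE' t r := by
  cases r with
  | nil => simp [pvE, pvE']
  | cons c r' =>
    have h1 : (t != a) = true := by cases a <;> cases t <;> simp_all
    simp [pvE, pvE', h1]

theorem pvG_eq_pvE (l : List Bool) (a : Bool) :
    pvG a false l = pvE a l ∧ pvG a true l = pvE' a l := by
  induction l generalizing a with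
  | nil => simp [pvG, pvE, pvE']
  | cons t r ih =>
    by_cases hat : (a == t) = true
    · have haeq : a = t := by cases a <;> cases t <;> simp_all
      subst haeq
      constructor
      · simp only [pvG, beq_self_eq_true, if_true]
        rw [(ih a).1, pvE_cons_self]
      · simp only [pvG, pvE', beq_self_eq_true, if_true, List.headI, bne_self_eq_false,
          Bool.false_eq_true, if_false]
        rw [(ih a).1, pvE_cons_self]
        simp
    · have hat' : (a == t) = false := by simpa using hat
      constructor
      · simp only [pvG, hat', Bool.false_eq_true, if_false]
        rw [(ih t).2, pvE_cons_ne a t r hat']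
        simp
      · simp only [pvG, pvE', hat', Bool.false_eq_true, if_false, List.headI]
        rw [(ih t).2, pvE_cons_ne a t r hat']
        have h1 : (a != t) = true := by cases a <;> cases t <;> simp_all
        simp [h1]

theorem pv_countP_dropLast (l : List Bool) (a : Bool) (n : Int) (hn : 1 ≤ n) :
    ((pvRLE a n l).dropLast).countP (fun r => r.2 == 1) = pvG a (n == 1) l := by
  induction l generalizing a n with
  | nil => simp [pvRLE, pvG]
  | cons t r ih =>
    by_cases hat : (a == t) = true
    · simp only [pvRLE, hat, if_true, pvG]
      rw [ih a (n + 1) (by omega)]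
      have h1 : ((n + 1 : Int) == 1) = false := by
        simp only [beq_eq_false_iff_ne]; omega
      rw [h1]
    · have hat' : (a == t) = false := by simpa using hat
      simp only [pvRLE, hat', Bool.false_eq_true, if_false, pvG]
      rw [List.dropLast_cons_of_ne_nil (pvRLE_ne_nil t 1 r), List.countP_cons]
      rw [ih t 1 (by omega)]
      simp only [beq_self_eq_true]
      by_cases hn1 : (n == (1 : Int)) = true
      · simp [hn1, Nat.add_comm]
      · have : (n == (1 : Int)) = false := by simpa using hn1
        simp [this]

theorem pv_countP_interior (l : List Bool) (a : Bool) (n : Int) (hn : 1 ≤ n) :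
    ((pvRLE a n l).tail.dropLast).countP (fun r => r.2 == 1) = pvE a l := by
  induction l generalizing a n with
  | nil => simp [pvRLE, pvE]
  | cons t r ih =>
    by_cases hat : (a == t) = true
    · have haeq : a = t := by cases a <;> cases t <;> simp_all
      simp only [pvRLE, hat, if_true]
      rw [ih a (n + 1) (by omega), haeq, pvE_cons_self]
    · have hat' : (a == t) = false := by simpa using hat
      simp only [pvRLE, hat', Bool.false_eq_true, if_false, List.tail_cons]
      rw [pv_countP_dropLast r t 1 (by omega)]
      simp only [beq_self_eq_true]
      rw [(pvG_eq_pvE r t).2, pvE_cons_ne a t r hat']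

theorem pv_getD_cons (y : Bool) (L : List Bool) (i : Int) (h : 1 ≤ i) (d : Bool) :
    PySem.List.pyGetD (y :: L) i d = PySem.List.pyGetD L (i - 1) d := by
  simp only [PySem.List.pyGetD, PySem.List.pyGet?, PySem.List.pyIdx?]
  have h0 : (0 : Int) ≤ i := by omega
  have h1 : (0 : Int) ≤ i - 1 := by omega
  simp only [h0, h1, if_pos, List.length_cons]
  by_cases h2 : i < (L.length : Int) + 1
  · rw [if_pos (by push_cast; omega), if_pos (by omega)]
    have hnat : i.toNat = (i - 1).toNat + 1 := by omega
    rw [hnat]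
    simp
  · rw [if_neg (by push_cast; omega), if_neg (by omega)]
    simp


theorem pv_shift (y : Bool) (L : List Bool) (m : Int) :
    (PySem.List.pyRange 2 m).countP
      (fun i => (PySem.List.pyGetD (y :: L) i false != PySem.List.pyGetD (y :: L) (i - 1) false)
        && (PySem.List.pyGetD (y :: L) i false != PySem.List.pyGetD (y :: L) (i + 1) false))
    = (PySem.List.pyRange 1 (m - 1)).countP
      (fun i => (PySem.List.pyGetD L i false != PySem.List.pyGetD L (i - 1) false)
        && (PySem.List.pyGetD L i false != PySem.List.pyGetD L (i + 1) false)) := by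
  rw [PySem.List.pyRange_one 2 m, PySem.List.pyRange_one 1 (m - 1), List.countP_map,
    List.countP_map]
  have hlen : (m - 2).toNat = (m - 1 - 1).toNat := by omega
  rw [hlen]
  apply List.countP_congr
  intro k _
  simp only [Function.comp_apply]
  have e1 : (2 : Int) + (k : Int) - 1 = 1 + (k : Int) := by omega
  have e2 : (2 : Int) + (k : Int) + 1 - 1 = 1 + (k : Int) + 1 := by omega
  rw [pv_getD_cons y L ((2 : Int) + k) (by omega) false,
      pv_getD_cons y L ((2 : Int) + k - 1) (by omega) false,
      pv_getD_cons y L ((2 : Int) + k + 1) (by omega) false]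
  rw [e1, e2]

theorem pv_countP_idx (l : List Bool) (x : Bool) :
    (PySem.List.pyRange 1 (((x :: l).length : Int) - 1)).countP
      (fun i => (PySem.List.pyGetD (x :: l) i false != PySem.List.pyGetD (x :: l) (i - 1) false)
        && (PySem.List.pyGetD (x :: l) i false != PySem.List.pyGetD (x :: l) (i + 1) false))
    = pvE x l := by
  induction l generalizing x with
  | nil =>
    rw [PySem.List.pyRange_one_eq_nil (by simp)]
    simp [pvE]
  | cons t r ih =>
    cases r with
    | nil =>
      rw [PySem.List.pyRange_one_eq_nil (by simp)]
      simp [pvE]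
    | cons c r' =>
      have hb : (1 : Int) < ((x :: t :: c :: r').length : Int) - 1 := by
        simp only [List.length_cons]
        push_cast
        omega
      rw [PySem.List.pyRange_one_cons hb, List.countP_cons]
      have hshift := pv_shift x (t :: c :: r') (((x :: t :: c :: r').length : Int) - 1)
      have hbound : ((x :: t :: c :: r').length : Int) - 1 - 1
          = (((t :: c :: r').length : Int) - 1) := by simp
      rw [hbound] at hshift
      have h2 : (1 : Int) + 1 = 2 := by norm_num
      rw [h2, hshift, ih t]
      -- the predicate at index 1
      have g0 : PySem.List.pyGetD (x :: t :: c :: r') (1 - 1) false = x := by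
        norm_num [PySem.List.pyGetD_zero_cons]
      have g1 : PySem.List.pyGetD (x :: t :: c :: r') 1 false = t := by
        rw [pv_getD_cons x _ 1 (by omega) false]
        norm_num [PySem.List.pyGetD_zero_cons]
      have g2 : PySem.List.pyGetD (x :: t :: c :: r') 2 false = c := by
        rw [pv_getD_cons x _ 2 (by omega) false]
        norm_num
        rw [pv_getD_cons t _ 1 (by omega) false]
        norm_num [PySem.List.pyGetD_zero_cons]
      rw [g0, g1, g2]
      simp only [pvE]
      by_cases hp : ((t != x) && (t != c)) = true
      · simp [hp, Nat.add_comm]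
      · simp only [hp]
        simp at hp
        by_cases htx : t = x
        · simp [htx]
        · simp [hp htx]

theorem pv_three_bool (x y z : Bool) :
    decide (((if z then (1:Int) else 0) - (if y then (1:Int) else 0)) *
            ((if y then (1:Int) else 0) - (if x then (1:Int) else 0)) < 0)
      = ((y != x) && (y != z)) := by
  cases x <;> cases y <;> cases z <;> decide

theorem pv_getD_map_range (g : Int → Int) (n j : Int) (h0 : 0 ≤ j) (h1 : j < n) :
    PySem.List.pyGetD ((PySem.List.pyRange 0 n).map g) j 0 = g j := by
  rw [PySem.List.pyGetD_eq_getElem _ 0 h0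
      (by simp [PySem.List.length_pyRange_one]; omega)]
  rw [List.getElem_map, PySem.List.getElem_pyRange_one]
  congr 1
  omega

theorem pv_count12 (bs : List Bool) :
    ((PySem.List.pyRange 1 12).map
      (fun i =>
        if PySem.List.pyGetD
              ((PySem.List.pyRange 0 12).map
                (fun i => PySem.List.pyGetD (bs.map (fun x => if x then (1:Int) else 0)) (i + 1) 0
                  - PySem.List.pyGetD (bs.map (fun x => if x then (1:Int) else 0)) i 0)) i 0
            * PySem.List.pyGetD
              ((PySem.List.pyRange 0 12).map
                (fun i => PySem.List.pyGetD (bs.map (fun x => if x then (1:Int) else 0)) (i + 1) 0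
                  - PySem.List.pyGetD (bs.map (fun x => if x then (1:Int) else 0)) i 0)) (i - 1) 0 < 0
        then (1 : Int) else 0)).sum
    = (((PySem.List.pyRange 1 12).countP
        (fun i => (PySem.List.pyGetD bs i false != PySem.List.pyGetD bs (i - 1) false)
          && (PySem.List.pyGetD bs i false != PySem.List.pyGetD bs (i + 1) false))) : Int) := by
  have hget : forall (j : Int), PySem.List.pyGetD (bs.map (fun x => if x then (1:Int) else 0)) j 0
      = (if PySem.List.pyGetD bs j false then (1:Int) else 0) :=
    fun j => PySem.List.pyGetD_map (fun x => if x then (1:Int) else 0) bs j false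
  have hA := PySem.List.sum_map_ite_one_zero
      (fun i => decide (PySem.List.pyGetD
            ((PySem.List.pyRange 0 12).map
              (fun i => PySem.List.pyGetD (bs.map (fun x => if x then (1:Int) else 0)) (i + 1) 0
                - PySem.List.pyGetD (bs.map (fun x => if x then (1:Int) else 0)) i 0)) i 0
          * PySem.List.pyGetD
            ((PySem.List.pyRange 0 12).map
              (fun i => PySem.List.pyGetD (bs.map (fun x => if x then (1:Int) else 0)) (i + 1) 0
                - PySem.List.pyGetD (bs.map (fun x => if x then (1:Int) else 0)) i 0)) (i - 1) 0 < 0))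
      (PySem.List.pyRange 1 12)
  simp only [decide_eq_true_eq] at hA
  rw [hA]
  congr 1
  apply List.countP_congr
  intro i hi
  rw [PySem.List.mem_pyRange_one] at hi
  obtain ⟨h1, h2⟩ := hi
  rw [pv_getD_map_range _ 12 i (by omega) (by omega),
      pv_getD_map_range _ 12 (i - 1) (by omega) (by omega)]
  simp only [show i - 1 + 1 = i from by omega]
  rw [hget (i + 1), hget i, hget (i - 1)]
  rw [pv_three_bool (PySem.List.pyGetD bs (i - 1) false) (PySem.List.pyGetD bs i false)
      (PySem.List.pyGetD bs (i + 1) false)]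

theorem pv_fold_bridge (l : List String) (acc : List (Bool × Int)) :
    l.foldl
      (fun runs c =>
        match runs.getLast? with
        | some (b, n) => if b == (c == "T") then runs.dropLast ++ [(b, n + 1)]
                         else runs ++ [((c == "T"), 1)]
        | none => [((c == "T"), 1)])
      acc
    = (l.map (fun c => c == "T")).foldl pvStep acc := by
  induction l generalizing acc with
  | nil => rfl
  | cons c l ih =>
    simp only [List.foldl_cons, List.map_cons]
    exact ih _


-- the two cores agree on any window of length 13.
theorem pv_core (bs : List Bool) (hlen : bs.length = 13) :
    (let nums : List Int := bs.map (fun t => if t then (1 : Int) else 0)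
     let diff : List Int := (PySem.List.pyRange 0 ((nums.length : Int) - 1)).map
       (fun i => PySem.List.pyGetD nums (i + 1) 0 - PySem.List.pyGetD nums i 0)
     let sign_changes : Int :=
       ((PySem.List.pyRange 1 ((diff.length : Int))).map
         (fun i => if PySem.List.pyGetD diff i 0 * PySem.List.pyGetD diff (i - 1) 0 < 0
                   then (1 : Int) else 0)).sum
     if sign_changes ≥ 3 then true else false)
    =
    (let runs : List (Bool × Int) := bs.foldl pvStep []
     let singles : Int := (PySem.List.slice runs (some 1) (some (-1))).foldl
       (fun acc r => if r.2 == 1 then acc + 1 else acc) 0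
     decide (singles ≥ 3)) := by
  cases bs with
  | nil => simp at hlen
  | cons x l =>
    simp only [List.length_map, hlen, PySem.List.length_pyRange_one, Nat.cast_ofNat]
    have e1 : (13 : Int) - 1 = 12 := by norm_num
    simp only [e1]
    simp only [show ((12 : Int) - 0) = 12 from by norm_num,
      show ((12 : Int)).toNat = (12 : Nat) from by decide, Nat.cast_ofNat]
    rw [pv_count12 (x :: l)]
    rw [pv_foldl_rle_nil x l, pv_slice_one_neg_one]
    rw [PySem.List.foldl_if_add_one (fun r : Bool × Int => r.2 == 1)]
    rw [zero_add]
    rw [pv_countP_interior l x 1 (by omega)]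
    have hidx := pv_countP_idx l x
    rw [show (((x :: l).length : Int) - 1) = 12 from by rw [hlen]; norm_num] at hidx
    rw [hidx]
    split_ifs with hx
    · exact (decide_eq_true hx).symm
    · exact (decide_eq_false hx).symm

-- ===== VERDICT (by name: the statement is the Claim_ definition above) =====
theorem elliott_wave_break_spec : Claim_equal_elliott_wave_break := by
  intro history _
  unfold Spec_elliott_wave_break elliott_wave_break elliott_wave_break_alt
  by_cases h : history.length < 13
  · simp [h]
  · simp only [h, if_false]
    rw [PySem.List.slice_from_neg_ofNat history 13 (by omega)]
    set d := List.drop (history.length - 13) history with hd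
    have hlen : (d.map (fun c => c == "T")).length = 13 := by
      simp [hd]; omega
    rw [pv_fold_bridge]
    have hc := pv_core (d.map (fun c => c == "T")) hlen
    simp only [List.map_map] at hc ⊢
    exact hc
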